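-- pv_equiv track=rewrite | github.com/Pedro-Manoel/ATAL | atividades/listas/lp_02/C_Dropping_Balls.py | drop_balls
-- ===== SOURCE A (Python) =====
-- def drop_balls(deep, balls):
--     node = 1
--
--     for _ in range(1, deep):
--         if balls % 2 == 1:
--             node = 2 * node  # turn left
--             balls = (balls + 1) // 2
--         else:
--             node = 2 * node + 1  # turn right
--             balls = balls // 2
--
--     return node
-- ===== SOURCE B (Python) =====
-- def drop_balls(deep, balls):
--     # Closed form: the leaf is 2**(deep-1) plus the bit-reversal of the low
--     # deep-1 bits of balls-1; each term is read independently, no evolving state.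
--     k = max(deep - 1, 0)
--     c = balls - 1
--     return (1 << k) + sum(((c >> i) & 1) << (k - 1 - i) for i in range(k))
-- ===== Notes on version B (the rewrite author's own statement) =====
-- stated objective: alternative
-- what changed: A simulates the drop as a state machine, branching on the parity of an evolving balls counter level by level; B has no evolving state at all: it returns the closed form 2**(deep-1) plus an order-independent sum of bit terms, each bit read directly from balls-1 by a shift, i.e. the bit-reversal of the low deep-1 bits of balls-1.
import Mathlib
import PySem

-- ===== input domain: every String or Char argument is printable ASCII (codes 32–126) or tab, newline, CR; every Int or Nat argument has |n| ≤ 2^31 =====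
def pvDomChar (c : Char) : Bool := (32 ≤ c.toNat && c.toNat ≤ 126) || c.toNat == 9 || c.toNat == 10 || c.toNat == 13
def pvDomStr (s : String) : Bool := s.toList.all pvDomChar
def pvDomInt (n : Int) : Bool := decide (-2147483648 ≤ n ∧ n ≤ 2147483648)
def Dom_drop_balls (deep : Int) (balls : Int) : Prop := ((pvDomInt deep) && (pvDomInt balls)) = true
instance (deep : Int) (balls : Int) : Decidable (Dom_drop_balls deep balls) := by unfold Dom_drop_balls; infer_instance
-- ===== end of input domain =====

-- B replaces A's level-by-level parity state machine by a closed form: the leaf is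
-- 2^(deep-1) plus an order-independent sum of bit terms read from balls-1 by shifts
-- (objective: alternative algorithmic decomposition, same asymptotic cost).

-- ===== PORT A =====
-- one iteration of A's loop body on the state (node, balls), branch order as in A
def dbStepA (st : Int × Int) (_ : Int) : Int × Int :=
  if PySem.Int.mod st.2 2 = 1 then
    (2 * st.1, PySem.Int.floordiv (st.2 + 1) 2)
  else
    (2 * st.1 + 1, PySem.Int.floordiv st.2 2)

def drop_balls (deep : Int) (balls : Int) : Int :=
  ((PySem.List.pyRange 1 deep 1).foldl dbStepA (1, balls)).1

-- ===== PORT B =====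
-- '(c >> i) & 1' is PySem.Int.band (c >>> i) 1 and '<<' is '<<<' (Python-exact on Int);
-- 'sum(... for i in range(k))' is a foldl of additions over pyRange 0 k 1
def drop_balls_alt (deep : Int) (balls : Int) : Int :=
  let k : Int := max (deep - 1) 0
  let c : Int := balls - 1
  ((1 : Int) <<< k.toNat) +
    (PySem.List.pyRange 0 k 1).foldl
      (fun acc i => acc + (PySem.Int.band (c >>> i.toNat) 1) <<< (k - 1 - i).toNat) 0

-- ===== PRECONDITION & SPEC =====
def Spec_drop_balls (deep : Int) (balls : Int) (out : Int) : Prop := out = drop_balls_alt deep balls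
instance (deep : Int) (balls : Int) (out : Int) : Decidable (Spec_drop_balls deep balls out) := by unfold Spec_drop_balls; infer_instance

-- ===== CLAIM (what is proved, stated in full; the proofs are below) =====
def Claim_equal_drop_balls : Prop := ∀ (deep : Int) (balls : Int), Dom_drop_balls deep balls → Spec_drop_balls deep balls (drop_balls deep balls)

-- ===== LEMMAS AND PROOFS =====

-- the common yardstick: F k c = the bit-reversal of the low k bits of c
def dbF : Nat → Int → Int
  | 0, _ => 0
  | k+1, c => (c % 2) * 2 ^ k + dbF k (c / 2)

-- one step of A, written on c = balls - 1: the appended bit is c % 2, and c halves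
theorem dbStepA_eq (node c x : Int) :
    dbStepA (node, c + 1) x = (2 * node + c % 2, c / 2 + 1) := by
  unfold dbStepA
  dsimp only
  rw [PySem.Int.mod_eq_emod_of_pos (a := c + 1) (by norm_num)]
  split_ifs with h
  · rw [PySem.Int.floordiv_eq_ediv_of_pos (a := c + 1 + 1) (by norm_num)]
    refine Prod.ext ?_ ?_ <;> dsimp only <;> omega
  · rw [PySem.Int.floordiv_eq_ediv_of_pos (a := c + 1) (by norm_num)]
    refine Prod.ext ?_ ?_ <;> dsimp only <;> omega

-- A's whole loop, on any iterated list: the node is node·2^len plus the reversed bits of c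
theorem dbFoldA (l : List Int) (node c : Int) :
    (l.foldl dbStepA (node, c + 1)).1 = node * 2 ^ l.length + dbF l.length c := by
  induction l generalizing node c with
  | nil => simp [dbF]
  | cons x xs ih =>
    rw [List.foldl_cons, dbStepA_eq, ih]
    simp only [List.length_cons, dbF]
    ring

-- B's sum over range k equals the same yardstick
theorem dbSumB (k : Nat) (c : Int) :
    ((List.range k).map (fun i => c / 2 ^ i % 2 * 2 ^ (k - 1 - i))).sum = dbF k c := by
  induction k generalizing c with
  | zero => simp [dbF]
  | succ k ih =>
    rw [List.range_succ_eq_map]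
    simp only [List.map_cons, List.map_map, List.sum_cons]
    have hterm : ∀ i : Nat,
        ((fun i => c / 2 ^ i % 2 * 2 ^ (k + 1 - 1 - i)) ∘ Nat.succ) i
          = (fun i => (c / 2) / 2 ^ i % 2 * 2 ^ (k - 1 - i)) i := by
      intro i
      simp only [Function.comp, Nat.succ_eq_add_one]
      rw [pow_succ', ← Int.ediv_ediv_of_nonneg (by norm_num)]
      congr 2
      omega
    rw [List.map_congr_left (fun i _ => hterm i), ih]
    simp [dbF]

-- ===== VERDICT (by name: the statement is the Claim_ definition above) =====
theorem drop_balls_spec : Claim_equal_drop_balls := by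
  intro deep balls _
  unfold Spec_drop_balls drop_balls drop_balls_alt
  dsimp only
  set k : Int := max (deep - 1) 0 with hk
  set c : Int := balls - 1 with hc
  have hb : balls = c + 1 := by omega
  -- A side
  rw [hb, dbFoldA, PySem.List.length_pyRange_one]
  have hlen : (deep - 1).toNat = k.toNat := by omega
  rw [hlen]
  -- B side: rewrite the shift/band step into the arithmetic form and fold into a sum
  have hfun : (fun (acc : Int) (i : Int) =>
      acc + (PySem.Int.band (c >>> ((i.toNat : Int))) 1) <<< ((k - 1 - i).toNat))
        = fun acc i => acc + (fun i : Int => c / 2 ^ i.toNat % 2 * 2 ^ (k - 1 - i).toNat) i := by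
    funext acc i
    rw [Int.shiftRight_natCast_right,
        PySem.Int.band_one, Int.shiftLeft_eq, Int.shiftRight_eq_div_pow,
        PySem.Int.mod_eq_emod_of_pos (by norm_num)]
    push_cast
    ring
  rw [hfun, PySem.List.foldl_add, zero_add, PySem.List.pyRange_one, List.map_map,
      Int.shiftLeft_eq, one_mul]
  have hmap : ∀ i ∈ List.range k.toNat,
      ((fun i : Int => c / 2 ^ i.toNat % 2 * 2 ^ (k - 1 - i).toNat) ∘ fun j : Nat => (0 : Int) + j) i
        = (fun i : Nat => c / 2 ^ i % 2 * 2 ^ (k.toNat - 1 - i)) i := by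
    intro i hi
    simp only [Function.comp, zero_add, Int.toNat_natCast]
    congr 2
    have : (0:Int) ≤ k := le_max_right _ _
    have hik : i < k.toNat := List.mem_range.mp hi
    omega
  rw [sub_zero, List.map_congr_left hmap, dbSumB]
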